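-- pv_equiv track=rewrite | github.com/SantinoVicentini/LearningPython-utdt-exercises | Archivos/peculiar.py | cant_peculiares_entre
-- ===== SOURCE A (Python) =====
-- def alterna_paridad(n:int)->bool:
--     '''
--     Especificaciones: determinar si los digitos de un numero alternan su paridad
--     Encabezado: def alterna_paridad(n:int) -> bool
--     Precondiciones: n debe pertenecer a los N + {0}
--     Postcondiciones: vr será 'True' si todos sus digitos alternan su paridad y será 'False' cuando dos digitos consecutivos tengan misma paridad.
--     '''
--
--     num:str = str(n)
--     vr:bool = True
--
--     i:int = 1
--     while i < len(num):
--         vr = vr and (int(num[i-1]) % 2 != int(num[i]) % 2)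
--
--         i = i + 1
--
--     return vr
--
-- def es_peculiar(n:int)->bool:
--     '''
--     Especificaciones: determina un numero peculiar. Un numero peculiar es un 'n' multiplo de 22 y que a su vez sus digitos alternan paridad
--     Encabezado: def es_peculiar(n:int) -> bool
--     Precondiciones: n debe pertenecer a los N + {0}
--     Postcondiciones: vr será 'True' si se trata de un 'numero peculiar' o 'False' si no lo es.
--     '''
--     vr:bool = True
--     vr = vr and (n % 22 == 0 and alterna_paridad(n))
--     return vr
--
-- def cant_peculiares_entre(n:int, m:int)->int:
--     '''
--     Especificaciones: Determina la cantidad de numeros peculiares que se encuentran en un rango de n a m inclusive.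
--     Encabezado: def cant_peculiares_entre(n:int, m:int) -> int
--     Precondiciones: n y m deben pertenecer a los N + {0}
--     Postcondiciones: vr será la cantidad de numeros peculiares que hay dentro de un rango de n inclusive hasta m inclusive.
--     '''
--     vr:int = 0
--     i:int = n - 1
--     contadorPec:int = 0
--     while i < m:
--         i+=1
--         if es_peculiar(i):
--             contadorPec += 1
--             vr:int = contadorPec
--     return vr
-- ===== SOURCE B (Python) =====
-- def cant_peculiares_entre(n: int, m: int) -> int:
--     # Walk only the multiples of 22 in [n, m] and test digit-parity
--     # alternation arithmetically (no string conversion).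
--     def alterna(x: int) -> bool:
--         d = x % 10
--         x //= 10
--         while x > 0:
--             e = x % 10
--             if (d - e) % 2 == 0:
--                 return False
--             d = e
--             x //= 10
--         return True
--
--     lo = -(-n // 22)          # ceil(n / 22)
--     hi = m // 22              # floor(m / 22)
--     total = 0
--     for k in range(lo, hi + 1):
--         if alterna(22 * k):
--             total += 1
--     return total
-- ===== Notes on version B (the rewrite author's own statement) =====
-- stated objective: faster
-- what changed: Instead of scanning every integer in [n,m] and testing divisibility plus string-based digit parity, B steps directly through the multiples of 22 between ceil(n/22) and floor(m/22) and checks parity alternation arithmetically by repeated divmod 10, with early exit.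
import Mathlib
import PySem

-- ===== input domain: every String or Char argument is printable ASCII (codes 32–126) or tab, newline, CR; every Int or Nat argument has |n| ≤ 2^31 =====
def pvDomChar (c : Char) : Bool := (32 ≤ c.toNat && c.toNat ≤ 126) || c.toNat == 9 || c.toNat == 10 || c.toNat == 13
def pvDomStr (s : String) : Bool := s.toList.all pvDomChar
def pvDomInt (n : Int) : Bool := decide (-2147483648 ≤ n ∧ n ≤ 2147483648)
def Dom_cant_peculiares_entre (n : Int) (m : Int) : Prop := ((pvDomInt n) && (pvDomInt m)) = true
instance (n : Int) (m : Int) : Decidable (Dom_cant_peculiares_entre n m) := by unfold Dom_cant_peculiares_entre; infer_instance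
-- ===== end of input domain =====

-- B replaces A's scan of every integer in [n,m] (string-based digit checks) by a walk over
-- the multiples of 22 only, testing parity alternation arithmetically (objective: faster).

-- ===== PORT A =====
-- the while loop of alterna_paridad; `none` = the ValueError of int('-') on a negative number's sign
def pyAltLoop (prev : Char) (rest : List Char) (vr : Bool) : Option Bool :=
  match rest with
  | [] => some vr
  | c :: cs =>
    if vr then
      match PySem.Int.ofChars? [prev], PySem.Int.ofChars? [c] with
      | some a, some b => pyAltLoop c cs (!(PySem.Int.mod a 2 == PySem.Int.mod b 2))
      | _, _ => none
    else pyAltLoop c cs false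

def alterna_paridad (x : Int) : Option Bool :=
  match PySem.Int.toChars x with
  | [] => some true
  | c :: cs => pyAltLoop c cs true

def es_peculiar (x : Int) : Option Bool :=
  if PySem.Int.mod x 22 == 0 then alterna_paridad x else some false

-- the while loop of cant_peculiares_entre; fuel = number of iterations m - (n-1)
def cantLoop : Nat → Int → Int → Int → Option Int
  | 0, _i, _cont, vr => some vr
  | f+1, i, cont, vr =>
    match es_peculiar (i+1) with
    | none => none
    | some true => cantLoop f (i+1) (cont+1) (cont+1)
    | some false => cantLoop f (i+1) cont vr

def cant_peculiares_entre (n : Int) (m : Int) : Int :=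
  (cantLoop (m - (n-1)).toNat (n-1) 0 0).getD 0

-- ===== PORT B =====
theorem floordiv_ten_toNat_lt (x : Int) (h : 0 < x) :
    (PySem.Int.floordiv x 10).toNat < x.toNat := by
  rw [PySem.Int.floordiv_eq_ediv_of_pos (by omega : (0:Int) < 10)]
  omega

-- the while loop of B's alterna: d = digit below, x = remaining high part
def altArith (d : Int) (x : Int) : Bool :=
  if h : 0 < x then
    if PySem.Int.mod (d - PySem.Int.mod x 10) 2 == 0 then false
    else altArith (PySem.Int.mod x 10) (PySem.Int.floordiv x 10)
  else true
termination_by x.toNat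
decreasing_by exact floordiv_ten_toNat_lt x h

def altB (x : Int) : Bool := altArith (PySem.Int.mod x 10) (PySem.Int.floordiv x 10)

def cant_peculiares_entre_alt (n : Int) (m : Int) : Int :=
  (PySem.List.pyRange (-(PySem.Int.floordiv (-n) 22)) (PySem.Int.floordiv m 22 + 1) 1).foldl
    (fun acc k => if altB (22 * k) then acc + 1 else acc) 0

-- ===== PRECONDITION & SPEC =====
-- Pre_ excludes exactly the inputs on which A raises ValueError: ranges [n, m] that contain a
-- negative multiple of 22, where int() is applied to the '-' sign character of str(i).
def Pre_cant_peculiares_entre (n : Int) (m : Int) : Prop :=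
  22 * PySem.Int.floordiv (min m (-22)) 22 < n
instance (n : Int) (m : Int) : Decidable (Pre_cant_peculiares_entre n m) := by
  unfold Pre_cant_peculiares_entre; infer_instance

def pvWitness_cant_peculiares_entre : Int × Int := (0, 100)

def Spec_cant_peculiares_entre (n : Int) (m : Int) (out : Int) : Prop := out = cant_peculiares_entre_alt n m
instance (n : Int) (m : Int) (out : Int) : Decidable (Spec_cant_peculiares_entre n m out) := by unfold Spec_cant_peculiares_entre; infer_instance

-- ===== CLAIM (what is proved, stated in full; the proofs are below) =====
def Claim_equal_cant_peculiares_entre : Prop := ∀ (n : Int) (m : Int), Dom_cant_peculiares_entre n m → Pre_cant_peculiares_entre n m → Spec_cant_peculiares_entre n m (cant_peculiares_entre n m)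

-- ===== LEMMAS AND PROOFS =====

-- the common specification: parity alternation as a Bool chain over the digit list
def parNe (a b : Int) : Bool := !(a % 2 == b % 2)

def chainB : Int → List Int → Bool
  | _, [] => true
  | a, b :: t => parNe a b && chainB b t

def chainB0 : List Int → Bool
  | [] => true
  | a :: t => chainB a t

theorem chainB_nil (a : Int) : chainB a [] = true := rfl
theorem chainB_cons (a b : Int) (t : List Int) :
    chainB a (b :: t) = (parNe a b && chainB b t) := rfl
theorem chainB0_nil : chainB0 [] = true := rfl
theorem chainB0_cons (a : Int) (t : List Int) : chainB0 (a :: t) = chainB a t := rfl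

theorem ofChars_digitChar (d : Nat) (h : d < 10) :
    PySem.Int.ofChars? [Nat.digitChar d] = some (d : Int) := by
  interval_cases d <;> rfl

theorem modBeq (a b : Int) :
    (!(PySem.Int.mod a 2 == PySem.Int.mod b 2)) = parNe a b := by
  rw [PySem.Int.mod_eq_emod_of_pos (by omega : (0:Int) < 2),
      PySem.Int.mod_eq_emod_of_pos (by omega : (0:Int) < 2)]
  rfl

theorem testBeq (d e : Int) :
    (PySem.Int.mod (d - e) 2 == 0) = !(parNe d e) := by
  rw [PySem.Int.mod_eq_emod_of_pos (by omega : (0:Int) < 2)]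
  by_cases h : d % 2 = e % 2
  · have h2 : (d - e) % 2 = 0 := by omega
    simp [parNe, h, h2]
  · have h2 : ¬ (d - e) % 2 = 0 := by omega
    simp [parNe, h, h2]

theorem tdc_eq (fuel : Nat) : ∀ (n : Nat) (ds : List Char), n < fuel →
    Nat.toDigitsCore 10 fuel n ds =
      (if n = 0 then ['0'] else ((Nat.digits 10 n).map Nat.digitChar).reverse) ++ ds := by
  induction fuel with
  | zero => intro n ds h; omega
  | succ f ih =>
    intro n ds h
    rw [Nat.toDigitsCore]
    by_cases h0 : n / 10 = 0
    · have hn10 : n < 10 := by omega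
      rw [if_pos h0]
      by_cases hz : n = 0
      · subst hz
        simp [show Nat.digitChar 0 = '0' from rfl]
      · rw [if_neg hz, Nat.digits_def' (by norm_num : 1 < 10) (by omega : 0 < n), h0,
            Nat.digits_zero]
        simp [Nat.mod_eq_of_lt hn10]
    · rw [if_neg h0, ih (n / 10) _ (by omega)]
      have hz : ¬ n = 0 := by omega
      rw [if_neg hz, if_neg h0, Nat.digits_def' (by norm_num : 1 < 10) (by omega : 0 < n)]
      simp

theorem toChars_nonneg (x : Int) (h : 0 ≤ x) :
    PySem.Int.toChars x =
      (if x.toNat = 0 then ['0'] else ((Nat.digits 10 x.toNat).map Nat.digitChar).reverse) := by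
  unfold PySem.Int.toChars
  rw [if_neg (by omega), Nat.toDigits, tdc_eq (x.toNat + 1) x.toNat [] (by omega), List.append_nil]

theorem pyAltLoop_digits : ∀ (ls : List Nat) (p : Nat) (vr : Bool), p < 10 → (∀ d ∈ ls, d < 10) →
    pyAltLoop (Nat.digitChar p) (ls.map Nat.digitChar) vr =
      some (vr && chainB (p : Int) (ls.map (fun d : Nat => (d : Int)))) := by
  intro ls
  induction ls with
  | nil => intro p vr _ _; simp [pyAltLoop, chainB_nil]
  | cons c cs ih =>
    intro p vr hp hall
    have hc : c < 10 := hall c (by simp)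
    have hcs : ∀ d ∈ cs, d < 10 := fun d hd => hall d (by simp [hd])
    rw [List.map_cons, pyAltLoop]
    cases vr with
    | false =>
      rw [if_neg (by simp), ih c false hc hcs]
      simp [chainB_cons]
    | true =>
      rw [if_pos rfl, ofChars_digitChar p hp, ofChars_digitChar c hc]
      show pyAltLoop c.digitChar (List.map Nat.digitChar cs)
          (!(PySem.Int.mod (p : Int) 2 == PySem.Int.mod (c : Int) 2)) =
        some (true && chainB (p : Int) ((c :: cs).map (fun d : Nat => (d : Int))))
      rw [modBeq, ih c _ hc hcs]
      simp only [List.map_cons, chainB_cons, Bool.true_and]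

theorem altArith_eq (N : Nat) : ∀ (x : Int), 0 ≤ x → x.toNat ≤ N → ∀ d : Int,
    altArith d x = chainB d ((Nat.digits 10 x.toNat).map (fun d : Nat => (d : Int))) := by
  induction N with
  | zero =>
    intro x hx hN d
    have : x = 0 := by omega
    subst this
    rw [altArith]
    simp [chainB_nil]
  | succ k ih =>
    intro x hx hN d
    rw [altArith]
    by_cases hpos : 0 < x
    · rw [dif_pos hpos]
      have hmod : PySem.Int.mod x 10 = x % 10 :=
        PySem.Int.mod_eq_emod_of_pos (by omega : (0:Int) < 10)
      have hdiv : PySem.Int.floordiv x 10 = x / 10 :=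
        PySem.Int.floordiv_eq_ediv_of_pos (by omega : (0:Int) < 10)
      have hdig : Nat.digits 10 x.toNat = x.toNat % 10 :: Nat.digits 10 (x.toNat / 10) :=
        Nat.digits_def' (by norm_num : 1 < 10) (by omega : 0 < x.toNat)
      have hcast : ((x.toNat % 10 : Nat) : Int) = x % 10 := by omega
      have hdivN : (x / 10).toNat = x.toNat / 10 := by omega
      rw [hmod, hdiv, hdig]
      simp only [List.map_cons]
      rw [hcast, testBeq, chainB_cons]
      cases hpar : parNe d (x % 10) with
      | false =>
        rw [Bool.not_false, if_pos rfl, Bool.false_and]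
      | true =>
        rw [Bool.not_true, if_neg (by simp), Bool.true_and,
            ih (x / 10) (by omega) (by omega) (x % 10), hdivN]
    · rw [dif_neg hpos]
      have : x = 0 := by omega
      subst this
      simp [chainB_nil]

theorem altB_eq (x : Int) (h : 0 ≤ x) :
    altB x = chainB0 ((Nat.digits 10 x.toNat).map (fun d : Nat => (d : Int))) := by
  unfold altB
  have hmod : PySem.Int.mod x 10 = x % 10 :=
    PySem.Int.mod_eq_emod_of_pos (by omega : (0:Int) < 10)
  have hdiv : PySem.Int.floordiv x 10 = x / 10 :=
    PySem.Int.floordiv_eq_ediv_of_pos (by omega : (0:Int) < 10)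
  rw [hmod, hdiv, altArith_eq (x / 10).toNat (x / 10) (by omega) le_rfl (x % 10)]
  by_cases h0 : x = 0
  · subst h0
    simp [chainB_nil, chainB0_nil]
  · have hdig : Nat.digits 10 x.toNat = x.toNat % 10 :: Nat.digits 10 (x.toNat / 10) :=
      Nat.digits_def' (by norm_num : 1 < 10) (by omega : 0 < x.toNat)
    have hcast : ((x.toNat % 10 : Nat) : Int) = x % 10 := by omega
    have hdivN : (x / 10).toNat = x.toNat / 10 := by omega
    rw [hdig]
    simp only [List.map_cons]
    rw [hcast, hdivN, chainB0_cons]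

theorem parNe_comm (a b : Int) : parNe a b = parNe b a := by
  unfold parNe
  by_cases h : a % 2 = b % 2
  · rw [h]
  · have h' : ¬ b % 2 = a % 2 := fun hh => h hh.symm
    simp [h, h']

theorem chainB_append (t : List Int) : ∀ a b s,
    chainB a (t ++ b :: s) = (chainB a (t ++ [b]) && chainB b s) := by
  induction t with
  | nil =>
    intro a b s
    simp [chainB_cons, chainB_nil, Bool.and_assoc]
  | cons c ct ih =>
    intro a b s
    simp only [List.cons_append, chainB_cons, ih c b s, Bool.and_assoc]

theorem chainB0_append_cons (l : List Int) (b : Int) (s : List Int) :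
    chainB0 (l ++ b :: s) = (chainB0 (l ++ [b]) && chainB b s) := by
  cases l with
  | nil => simp [chainB0_cons, chainB_cons, chainB_nil]
  | cons a t =>
    show chainB a (t ++ b :: s) = (chainB a (t ++ [b]) && chainB b s)
    exact chainB_append t a b s

theorem chainB0_rev_aux : ∀ (t : List Int) (a : Int), chainB0 (t.reverse ++ [a]) = chainB a t := by
  intro t
  induction t with
  | nil => intro a; simp [chainB0_cons, chainB_nil]
  | cons b s ih =>
    intro a
    rw [List.reverse_cons, List.append_assoc]
    show chainB0 (s.reverse ++ (b :: [a])) = _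
    rw [chainB0_append_cons, ih b, chainB_cons, chainB_nil, Bool.and_true, chainB_cons,
        parNe_comm a b, Bool.and_comm]

theorem chainB0_rev (l : List Int) : chainB0 l.reverse = chainB0 l := by
  cases l with
  | nil => rfl
  | cons a t => rw [List.reverse_cons, chainB0_rev_aux, chainB0_cons]

theorem alterna_eq (x : Int) (h : 0 ≤ x) : alterna_paridad x = some (altB x) := by
  unfold alterna_paridad
  rw [toChars_nonneg x h]
  by_cases h0 : x.toNat = 0
  · rw [if_pos h0, altB_eq x h, h0]
    show pyAltLoop '0' [] true = _
    simp [pyAltLoop, chainB0_nil]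
  · rw [if_neg h0]
    set L := Nat.digits 10 x.toNat with hL
    have hLne : L.reverse ≠ [] := by
      simp [hL, Nat.digits_ne_nil_iff_ne_zero, h0]
    obtain ⟨p, ls, hpls⟩ : ∃ p ls, L.reverse = p :: ls := by
      cases hc : L.reverse with
      | nil => exact absurd hc hLne
      | cons a b => exact ⟨a, b, rfl⟩
    have hall : ∀ d ∈ L.reverse, d < 10 := by
      intro d hd
      exact Nat.digits_lt_base (by norm_num) (List.mem_reverse.mp hd)
    have hp10 : p < 10 := hall p (by rw [hpls]; simp)
    have hls10 : ∀ d ∈ ls, d < 10 := fun d hd => hall d (by rw [hpls]; simp [hd])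
    rw [← List.map_reverse, hpls, List.map_cons]
    show pyAltLoop p.digitChar (List.map Nat.digitChar ls) true = _
    rw [pyAltLoop_digits ls p true hp10 hls10, altB_eq x h, ← hL, Bool.true_and]
    have hmap : ((p : Int) :: ls.map (fun d : Nat => (d : Int)))
        = (L.map (fun d : Nat => (d : Int))).reverse := by
      rw [← List.map_reverse, hpls, List.map_cons]
    have hcb : chainB (p : Int) (ls.map (fun d : Nat => (d : Int)))
        = chainB0 ((L.map (fun d : Nat => (d : Int))).reverse) := by
      rw [← hmap, chainB0_cons]
    rw [hcb, chainB0_rev]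

def pecB (x : Int) : Bool := (PySem.Int.mod x 22 == 0) && altB x

theorem es_peculiar_eq (x : Int) (h : 0 ≤ x ∨ ¬ (22 ∣ x)) :
    es_peculiar x = some (pecB x) := by
  unfold es_peculiar pecB
  by_cases hd : PySem.Int.mod x 22 == 0
  · have hdvd : (22:Int) ∣ x := by
      rw [← PySem.Int.mod_eq_zero_iff_dvd]
      simpa using hd
    have hx : 0 ≤ x := by tauto
    rw [if_pos hd, alterna_eq x hx, hd, Bool.true_and]
  · have hb : (PySem.Int.mod x 22 == 0) = false := by simpa using hd
    rw [if_neg hd, hb, Bool.false_and]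

theorem cantLoop_eq : ∀ (f : Nat) (i c : Int),
    (∀ j : Int, i < j → j ≤ i + f → (0 ≤ j ∨ ¬ (22 ∣ j))) →
    cantLoop f i c c =
      some (c + (((List.range f).map (fun t : Nat => i + 1 + t)).countP pecB : Int)) := by
  intro f
  induction f with
  | zero => intro i c _; simp [cantLoop]
  | succ f ih =>
    intro i c h
    rw [cantLoop, es_peculiar_eq (i+1) (h (i+1) (by omega) (by push_cast; omega))]
    have hrange : (List.range (f+1)).map (fun t : Nat => i + 1 + t)
        = (i + 1) :: (List.range f).map (fun t : Nat => (i + 1) + 1 + t) := by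
      rw [List.range_succ_eq_map, List.map_cons, List.map_map]
      congr 1
      · simp
      · apply List.map_congr_left
        intro t _
        simp only [Function.comp_apply]
        push_cast
        ring
    have hside : ∀ j : Int, i + 1 < j → j ≤ (i + 1) + f → (0 ≤ j ∨ ¬ (22 ∣ j)) := by
      intro j h1 h2
      refine h j (by omega) ?_
      push_cast
      push_cast at h2
      omega
    cases hp : pecB (i+1) with
    | true =>
      show cantLoop f (i+1) (c+1) (c+1) = _
      rw [ih (i+1) (c+1) hside, hrange, List.countP_cons, hp, if_pos rfl]
      congr 1
      push_cast
      ring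
    | false =>
      show cantLoop f (i+1) c c = _
      rw [ih (i+1) c hside, hrange, List.countP_cons, hp, if_neg (by simp), Nat.add_zero]

theorem cantA_eq (n m : Int) (hpre : Pre_cant_peculiares_entre n m) :
    cant_peculiares_entre n m =
      ((((List.range (m - (n-1)).toNat).map (fun t : Nat => (n-1) + 1 + t)).countP pecB : Nat) : Int) := by
  unfold Pre_cant_peculiares_entre at hpre
  rw [PySem.Int.floordiv_eq_ediv_of_pos (by omega : (0:Int) < 22)] at hpre
  unfold cant_peculiares_entre
  rw [cantLoop_eq ((m - (n-1)).toNat) (n-1) 0 ?side]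
  · simp
  case side =>
    intro j h1 h2
    by_contra hc
    push_neg at hc
    obtain ⟨hneg, hdvd⟩ := hc
    obtain ⟨k, hk⟩ := hdvd
    omega

theorem cantB_eq (n m : Int) :
    cant_peculiares_entre_alt n m =
      (((PySem.List.pyRange (-(PySem.Int.floordiv (-n) 22)) (PySem.Int.floordiv m 22 + 1) 1).countP
        (fun k => altB (22 * k)) : Nat) : Int) := by
  unfold cant_peculiares_entre_alt
  rw [PySem.List.foldl_if_add_one]
  simp

theorem count_eq (n m : Int) :
    ((((List.range (m - (n-1)).toNat).map (fun t : Nat => (n-1) + 1 + t)).countP pecB : Nat) : Int)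
      = (((PySem.List.pyRange (-(PySem.Int.floordiv (-n) 22)) (PySem.Int.floordiv m 22 + 1) 1).countP
          (fun k => altB (22 * k)) : Nat) : Int) := by
  rw [PySem.Int.floordiv_eq_ediv_of_pos (by omega : (0:Int) < 22),
      PySem.Int.floordiv_eq_ediv_of_pos (by omega : (0:Int) < 22),
      PySem.List.pyRange_one]
  set lo : Int := -((-n) / 22) with hlo
  set hi : Int := m / 22 with hhi
  set LA : List Int := (List.range (m - (n-1)).toNat).map (fun t : Nat => (n-1) + 1 + t) with hLA
  set KB : List Int := (List.range ((hi + 1) - lo).toNat).map (fun k : Nat => lo + k) with hKB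
  have hmemA : ∀ x : Int, x ∈ LA.filter (fun x => PySem.Int.mod x 22 == 0) ↔
      (n ≤ x ∧ x ≤ m ∧ 22 ∣ x) := by
    intro x
    simp only [hLA, List.mem_filter, List.mem_map, List.mem_range, beq_iff_eq,
      PySem.Int.mod_eq_zero_iff_dvd]
    constructor
    · rintro ⟨⟨t, ht, rfl⟩, hdvd⟩
      exact ⟨by omega, by omega, hdvd⟩
    · rintro ⟨h1, h2, hdvd⟩
      exact ⟨⟨(x - n).toNat, by omega, by omega⟩, hdvd⟩
  have hmemB : ∀ x : Int, x ∈ KB.map (fun k => 22 * k) ↔ (n ≤ x ∧ x ≤ m ∧ 22 ∣ x) := by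
    intro x
    simp only [hKB, List.mem_map, List.mem_range]
    constructor
    · rintro ⟨k, ⟨t, ht, rfl⟩, rfl⟩
      exact ⟨by omega, by omega, ⟨lo + t, rfl⟩⟩
    · rintro ⟨h1, h2, ⟨c, hc⟩⟩
      exact ⟨c, ⟨(c - lo).toNat, by omega, by omega⟩, by omega⟩
  have hpA : (LA.filter (fun x => PySem.Int.mod x 22 == 0)).Pairwise (· < ·) := by
    have h1 : LA.Pairwise (· < ·) := by
      rw [hLA]
      exact List.pairwise_lt_range.map _ (fun a b hab => by omega)
    exact h1.filter _
  have hpB : (KB.map (fun k => 22 * k)).Pairwise (· < ·) := by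
    have h1 : KB.Pairwise (· < ·) := by
      rw [hKB]
      exact List.pairwise_lt_range.map _ (fun a b hab => by omega)
    exact h1.map _ (fun a b hab => by omega)
  have hndA : (LA.filter (fun x => PySem.Int.mod x 22 == 0)).Nodup :=
    hpA.imp (fun h => ne_of_lt h)
  have hndB : (KB.map (fun k => 22 * k)).Nodup :=
    hpB.imp (fun h => ne_of_lt h)
  have hperm : (LA.filter (fun x => PySem.Int.mod x 22 == 0)).Perm (KB.map (fun k => 22 * k)) := by
    rw [List.perm_ext_iff_of_nodup hndA hndB]
    intro x
    rw [hmemA x, hmemB x]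
  have heq : LA.filter (fun x => PySem.Int.mod x 22 == 0) = KB.map (fun k => 22 * k) :=
    List.Perm.eq_of_pairwise' (hpA.imp (fun h => le_of_lt h))
      (hpB.imp (fun h => le_of_lt h)) hperm
  have hcnt : LA.countP pecB = KB.countP (fun k => altB (22 * k)) := by
    have h1 : LA.countP pecB
        = (LA.filter (fun x => PySem.Int.mod x 22 == 0)).countP altB := by
      rw [List.countP_filter]
      apply List.countP_congr
      intro x _
      simp [pecB, Bool.and_comm]
    rw [h1, heq, List.countP_map]
    rfl
  rw [hcnt]

-- ===== VERDICT (by name: the statement is the Claim_ definition above) =====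
theorem cant_peculiares_entre_spec : Claim_equal_cant_peculiares_entre := by
  intro n m _ hpre
  unfold Spec_cant_peculiares_entre
  rw [cantA_eq n m hpre, cantB_eq n m, count_eq n m]
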